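-- pv_equiv track=rewrite | github.com/pjv-stack/synapse-system-pro | .synapse/agents/docs-writer/tools/content_tools.py | _check_heading_structure
-- ===== SOURCE A (Python) =====
-- from typing import Dict, Any, List, Optional
--
-- def _check_heading_structure(content: str) -> List[str]:
--     """Check for heading structure issues."""
--     issues = []
--     lines = content.split('\n')
--     prev_level = 0
--
--     for i, line in enumerate(lines):
--         if line.startswith('#'):
--             level = len(line) - len(line.lstrip('#'))
--
--             if level > prev_level + 1:
--                 issues.append(f"Line {i+1}: Heading level jumps from {prev_level} to {level}")
--
--             prev_level = level
--
--     return issues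
-- ===== SOURCE B (Python) =====
-- from typing import List
--
-- def _check_heading_structure(content: str) -> List[str]:
--     """Check heading structure by a character-level scan (no split, no line list)."""
--     issues = []
--     prev_level = 0
--     line_no = 1
--     pos = 0
--     n = len(content)
--     while pos < n:
--         if content[pos] == '#':
--             level = 0
--             while pos < n and content[pos] == '#':
--                 level += 1
--                 pos += 1
--             if level > prev_level + 1:
--                 issues.append(f"Line {line_no}: Heading level jumps from {prev_level} to {level}")
--             prev_level = level
--         while pos < n and content[pos] != '\n':
--             pos += 1
--         pos += 1  # step over the newline (or past the end)
--         line_no += 1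
--     return issues
-- ===== Notes on version B (the rewrite author's own statement) =====
-- stated objective: alternative
-- what changed: Replaces A's split-into-lines-then-enumerate loop by a character-level scanner over the raw string: an index walks the text once, counts the leading '#' run in place, skips to each newline and tracks the line number itself, so no line list is ever built.
import Mathlib
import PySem

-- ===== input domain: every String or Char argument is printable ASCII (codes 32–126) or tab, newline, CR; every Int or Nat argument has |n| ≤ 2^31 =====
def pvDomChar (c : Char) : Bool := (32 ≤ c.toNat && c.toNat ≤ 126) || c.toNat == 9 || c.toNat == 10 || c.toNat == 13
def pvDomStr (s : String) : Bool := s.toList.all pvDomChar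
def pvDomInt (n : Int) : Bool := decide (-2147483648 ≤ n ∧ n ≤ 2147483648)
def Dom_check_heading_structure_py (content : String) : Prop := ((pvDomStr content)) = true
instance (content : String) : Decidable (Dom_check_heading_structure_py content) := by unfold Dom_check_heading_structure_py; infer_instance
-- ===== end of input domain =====

-- B replaces A's split-into-lines loop by a one-pass character-level scanner that
-- counts '#' runs and tracks the line number itself (alternative decomposition).

-- the f-string message, shared by both ports (n is the 1-based line number printed)
def pvMsg (n prev lv : Int) : String :=
  "Line " ++ PySem.Int.toStr n ++ ": Heading level jumps from " ++
    PySem.Int.toStr prev ++ " to " ++ PySem.Int.toStr lv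

-- ===== PORT A =====
-- level = len(line) - len(line.lstrip('#')): lstrip('#') ported by hand as
-- dropWhile (· == '#'), exact since lstrip with the one-char set '#' drops exactly
-- the leading run of '#'.
def pvLevel (line : List Char) : Int :=
  PySem.Chars.len line - PySem.Chars.len (line.dropWhile (· == '#'))

def check_heading_structure_py (content : String) : List String :=
  let lines := PySem.Chars.splitOn content.toList ['\n']   -- content.split('\n')
  ((PySem.List.enumerate lines 0).foldl
    (fun (st : List String × Int) (p : Int × List Char) =>
      if PySem.Chars.startswith p.2 ['#'] then
        let level := pvLevel p.2
        ((if level > st.2 + 1 then st.1 ++ [pvMsg (p.1 + 1) st.2 level] else st.1), level)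
      else st)
    ([], 0)).1

-- ===== PORT B =====
-- transliteration of Source B's index scanner over the raw characters: each inner
-- 'while' advancing pos becomes a dropWhile on the remaining characters, the
-- '#'-count is the length consumed, 'pos += 1' over the newline is 'drop 1'.
def pvScan : List Char → Int → Int → List String
  | [], _, _ => []
  | c :: cs, lineNo, prev =>
    if c == '#' then
      let rest1 := (c :: cs).dropWhile (· == '#')          -- count the '#' run
      let level : Int := ((c :: cs).length : Int) - (rest1.length : Int)
      let rest2 := (rest1.dropWhile (· != '\n')).drop 1    -- skip to past the newline
      (if level > prev + 1 then [pvMsg lineNo prev level] else []) ++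
        pvScan rest2 (lineNo + 1) level
    else
      pvScan (((c :: cs).dropWhile (· != '\n')).drop 1) (lineNo + 1) prev
termination_by cs _ _ => cs.length
decreasing_by
  · have h1 := List.length_dropWhile_le (p := fun c => c == '#') (l := c :: cs)
    have h2 := List.length_dropWhile_le (p := fun c => c != '\n')
      (l := (c :: cs).dropWhile (· == '#'))
    simp only [List.length_drop, List.length_cons] at *
    omega
  · have h2 := List.length_dropWhile_le (p := fun c => c != '\n') (l := c :: cs)
    simp only [List.length_drop, List.length_cons] at *
    omega

def check_heading_structure_py_alt (content : String) : List String :=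
  pvScan content.toList 1 0

-- ===== PRECONDITION & SPEC =====
def Spec_check_heading_structure_py (content : String) (out : List String) : Prop := out = check_heading_structure_py_alt content
instance (content : String) (out : List String) : Decidable (Spec_check_heading_structure_py content out) := by unfold Spec_check_heading_structure_py; infer_instance

-- ===== CLAIM (what is proved, stated in full; the proofs are below) =====
def Claim_equal_check_heading_structure_py : Prop := ∀ (content : String), Dom_check_heading_structure_py content → Spec_check_heading_structure_py content (check_heading_structure_py content)

-- ===== LEMMAS AND PROOFS =====

-- reference: split into lines by '\n', structurally
def pvSplitNL : List Char → List (List Char)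
  | [] => [[]]
  | c :: cs => if c = '\n' then [] :: pvSplitNL cs else (pvSplitNL cs).modifyHead (c :: ·)

theorem pvSplitNL_ne_nil (cs : List Char) : pvSplitNL cs ≠ [] := by
  induction cs with
  | nil => simp [pvSplitNL]
  | cons c cs ih =>
    rw [pvSplitNL]
    split
    · simp
    · cases h : pvSplitNL cs with
      | nil => exact absurd h ih
      | cons x xs => simp [List.modifyHead]

theorem pvSplitNL_all (cs : List Char) (h : ∀ x ∈ cs, x ≠ '\n') : pvSplitNL cs = [cs] := by
  induction cs with
  | nil => rfl
  | cons c cs ih =>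
    have hc : c ≠ '\n' := h c (by simp)
    rw [pvSplitNL, if_neg hc, ih (fun x hx => h x (by simp [hx]))]
    simp [List.modifyHead]

theorem pvSplitNL_break (pre post : List Char) (h : ∀ x ∈ pre, x ≠ '\n') :
    pvSplitNL (pre ++ '\n' :: post) = pre :: pvSplitNL post := by
  induction pre with
  | nil => simp [pvSplitNL]
  | cons p pre ih =>
    have hp : p ≠ '\n' := h p (by simp)
    rw [List.cons_append, pvSplitNL, if_neg hp, ih (fun x hx => h x (by simp [hx]))]
    simp [List.modifyHead]

theorem pvDropWhile_head (p : Char → Bool) (l : List Char) (x : Char) (tl : List Char)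
    (h : l.dropWhile p = x :: tl) : p x = false := by
  induction l with
  | nil => simp at h
  | cons c cs ih =>
    rw [List.dropWhile_cons] at h
    by_cases hc : p c = true
    · rw [if_pos hc] at h; exact ih h
    · rw [if_neg hc] at h
      obtain ⟨h1, _⟩ := List.cons.inj h
      rw [← h1]
      simpa using hc

theorem pvSplitNL_decomp (cs : List Char) :
    pvSplitNL cs = cs.takeWhile (fun c => c != '\n') ::
      (match cs.dropWhile (fun c => c != '\n') with
        | [] => ([] : List (List Char))
        | _ :: tl => pvSplitNL tl) := by
  cases hd : cs.dropWhile (fun c => c != '\n') with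
  | nil =>
    have ht : cs.takeWhile (fun c => c != '\n') = cs := by
      conv_rhs => rw [← List.takeWhile_append_dropWhile (p := fun c => c != '\n') (l := cs)]
      rw [hd, List.append_nil]
    rw [ht]
    show pvSplitNL cs = [cs]
    exact pvSplitNL_all cs (fun x hx => by
      have := (List.dropWhile_eq_nil_iff.mp hd) x hx
      simpa using this)
  | cons x tl =>
    have hx : x = '\n' := by
      have := pvDropWhile_head _ _ _ _ hd
      simpa using this
    subst hx
    show pvSplitNL cs = List.takeWhile (fun c => c != '\n') cs :: pvSplitNL tl
    have hcs : cs = cs.takeWhile (fun c => c != '\n') ++ '\n' :: tl := by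
      conv_lhs => rw [← List.takeWhile_append_dropWhile (p := fun c => c != '\n') (l := cs)]
      rw [hd]
    conv_lhs => rw [hcs]
    exact pvSplitNL_break _ _ (fun y hy => by
      have := List.mem_takeWhile_imp hy
      simpa using this)

-- splitOn with the one-char separator '\n' is pvSplitNL
theorem pvGo_eq (fuel : Nat) (l cur : List Char) (acc : List (List Char))
    (hf : l.length ≤ fuel) :
    PySem.Chars.splitOn.go ['\n'] fuel l cur acc =
      acc.reverse ++ ((pvSplitNL l).modifyHead (cur.reverse ++ ·)) := by
  induction l generalizing fuel cur acc with
  | nil =>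
    cases fuel <;>
      simp [PySem.Chars.splitOn.go, pvSplitNL, List.modifyHead]
  | cons c cs ih =>
    cases fuel with
    | zero => simp at hf
    | succ f =>
      rw [PySem.Chars.splitOn.go]
      by_cases h : c = '\n'
      · subst h
        have hp : List.isPrefixOf ['\n'] ('\n' :: cs) = true := by
          simp [List.isPrefixOf]
        rw [if_pos hp]
        have hdrop : List.drop (['\n'] : List Char).length ('\n' :: cs) = cs := rfl
        rw [hdrop]
        simp only [List.length_cons] at hf
        rw [ih f [] ((cur.reverse) :: acc) (by omega)]
        rw [pvSplitNL, if_pos rfl]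
        cases hsp : pvSplitNL cs with
        | nil => exact absurd hsp (pvSplitNL_ne_nil cs)
        | cons x xs => simp [List.modifyHead]
      · have hp : List.isPrefixOf ['\n'] (c :: cs) = false := by
          simp [List.isPrefixOf]
          exact fun hh => absurd hh.symm h
        rw [if_neg (by simp [hp])]
        simp only [List.length_cons] at hf
        rw [ih f (c :: cur) acc (by omega)]
        rw [pvSplitNL, if_neg h]
        cases hsp : pvSplitNL cs with
        | nil => exact absurd hsp (pvSplitNL_ne_nil cs)
        | cons x xs => simp [List.modifyHead]

theorem pvSplitOn_eq (cs : List Char) :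
    PySem.Chars.splitOn cs ['\n'] = pvSplitNL cs := by
  rw [PySem.Chars.splitOn, pvGo_eq (cs.length + 1) cs [] [] (by omega)]
  cases hsp : pvSplitNL cs with
  | nil => exact absurd hsp (pvSplitNL_ne_nil cs)
  | cons x xs => simp [List.modifyHead]

-- the common reference semantics: walk the line list, threading line number and level
def pvSpecLines : List (List Char) → Int → Int → List String
  | [], _, _ => []
  | l :: rest, n, prev =>
    if PySem.Chars.startswith l ['#'] then
      (if pvLevel l > prev + 1 then [pvMsg n prev (pvLevel l)] else []) ++
        pvSpecLines rest (n + 1) (pvLevel l)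
    else
      pvSpecLines rest (n + 1) prev

-- A's fold over the enumerated lines computes pvSpecLines
theorem pvA_loop (lines : List (List Char)) (k : Int) (issues : List String) (prev : Int) :
    ((PySem.List.enumerate lines k).foldl
      (fun (st : List String × Int) (p : Int × List Char) =>
        if PySem.Chars.startswith p.2 ['#'] then
          let level := pvLevel p.2
          ((if level > st.2 + 1 then st.1 ++ [pvMsg (p.1 + 1) st.2 level] else st.1), level)
        else st)
      (issues, prev)).1 = issues ++ pvSpecLines lines (k + 1) prev := by
  induction lines generalizing k issues prev with
  | nil => simp [pvSpecLines, PySem.List.enumerate_nil]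
  | cons l rest ih =>
    rw [PySem.List.enumerate_cons, List.foldl_cons]
    by_cases h : PySem.Chars.startswith l ['#']
    · simp only [h, if_pos]
      rw [ih]
      by_cases h2 : pvLevel l > prev + 1 <;>
        simp [pvSpecLines, h, h2, List.append_assoc]
    · simp only [h]
      rw [ih]
      simp [pvSpecLines, h]

-- the leading '#' run is inside the first line
theorem pvTakeHash_takeLine (cs : List Char) :
    (cs.takeWhile (fun c => c != '\n')).takeWhile (fun c => c == '#') =
      cs.takeWhile (fun c => c == '#') := by
  induction cs with
  | nil => rfl
  | cons c cs ih =>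
    by_cases h : c = '#'
    · subst h
      have hc : (('#' : Char) != '\n') = true := by decide
      simp [hc, ih]
    · by_cases h2 : c = '\n'
      · subst h2
        simp
      · simp [h, h2]

-- dropping the '#' run does not move the first newline
theorem pvDropHash_dropLine (cs : List Char) :
    ((cs.dropWhile (fun c => c == '#')).dropWhile (fun c => c != '\n')) =
      cs.dropWhile (fun c => c != '\n') := by
  induction cs with
  | nil => rfl
  | cons c cs ih =>
    by_cases h : c = '#'
    · subst h
      have hc : (('#' : Char) != '\n') = true := by decide
      simp [hc, ih]
    · simp [List.dropWhile_cons, h]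

theorem pvLen_takeWhile_eq (p : Char → Bool) (l : List Char) :
    (l.length : Int) - ((l.dropWhile p).length : Int) = ((l.takeWhile p).length : Int) := by
  have h := List.takeWhile_append_dropWhile (p := p) (l := l)
  have hlen : (l.takeWhile p).length + (l.dropWhile p).length = l.length := by
    conv_rhs => rw [← h]
    rw [List.length_append]
  omega

-- B's scanner computes pvSpecLines of the line decomposition
theorem pvB_scan (cs : List Char) (n prev : Int) :
    pvScan cs n prev = pvSpecLines (pvSplitNL cs) n prev := by
  induction hlen : cs.length using Nat.strong_induction_on generalizing cs n prev with
  | _ len ih =>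
  cases cs with
  | nil =>
    rw [pvSplitNL]
    simp [pvScan, pvSpecLines, PySem.Chars.startswith, List.isPrefixOf]
  | cons c cs =>
    rw [pvSplitNL_decomp]
    have hrec : ∀ (m : Int),
        pvScan (((c :: cs).dropWhile (fun c => c != '\n')).drop 1) (n + 1) m =
          pvSpecLines (match (c :: cs).dropWhile (fun c => c != '\n') with
            | [] => ([] : List (List Char))
            | _ :: tl => pvSplitNL tl) (n + 1) m := by
      intro m
      cases hd : (c :: cs).dropWhile (fun c => c != '\n') with
      | nil => simp [pvScan, pvSpecLines]
      | cons x tl =>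
        simp only [List.drop_succ_cons, List.drop_zero]
        have hle := List.length_dropWhile_le (p := fun c => c != '\n') (l := c :: cs)
        rw [hd] at hle
        simp only [List.length_cons] at hle hlen
        exact ih tl.length (by omega) tl (n + 1) m rfl
    by_cases h : c = '#'
    · -- heading line
      subst h
      have hc : (('#' : Char) != '\n') = true := by decide
      have hL : List.takeWhile (fun c => c != '\n') ('#' :: cs) =
          '#' :: List.takeWhile (fun c => c != '\n') cs := by
        simp [hc]
      have hsw : PySem.Chars.startswith
          (List.takeWhile (fun c => c != '\n') ('#' :: cs)) ['#'] = true := by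
        rw [hL]; simp [PySem.Chars.startswith, List.isPrefixOf]
      have hlv : ((('#' :: cs : List Char)).length : Int) -
            ((List.dropWhile (fun c => c == '#') ('#' :: cs)).length : Int) =
          pvLevel (List.takeWhile (fun c => c != '\n') ('#' :: cs)) := by
        rw [pvLevel]
        simp only [PySem.Chars.len]
        rw [pvLen_takeWhile_eq, pvLen_takeWhile_eq, pvTakeHash_takeLine]
      rw [pvScan]
      simp only [show (('#' : Char) == '#') = true from rfl, if_true,
        pvDropHash_dropLine, hlv, hrec (pvLevel (List.takeWhile (fun c => c != '\n') ('#' :: cs)))]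
      rw [pvSpecLines, if_pos hsw]
    · -- not a heading line
      have hsw : PySem.Chars.startswith
          (List.takeWhile (fun c => c != '\n') (c :: cs)) ['#'] = false := by
        by_cases h2 : c = '\n'
        · subst h2
          have : List.takeWhile (fun c => c != '\n') ('\n' :: cs) = [] := by
            simp
          rw [this]; simp [PySem.Chars.startswith, List.isPrefixOf]
        · have : List.takeWhile (fun c => c != '\n') (c :: cs) =
              c :: List.takeWhile (fun c => c != '\n') cs := by
            simp [h2]
          rw [this]
          simp [PySem.Chars.startswith, List.isPrefixOf]
          exact fun hh => absurd hh.symm h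
      rw [pvScan]
      rw [if_neg (by simp [h]), hrec prev]
      rw [pvSpecLines, if_neg (by simp [hsw])]

-- ===== VERDICT (by name: the statement is the Claim_ definition above) =====
theorem check_heading_structure_py_spec : Claim_equal_check_heading_structure_py := by
  intro content _
  unfold Spec_check_heading_structure_py check_heading_structure_py check_heading_structure_py_alt
  rw [pvSplitOn_eq, pvA_loop, pvB_scan]
  norm_num
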